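-- pv_equiv track=rewrite | github.com/Chen-chen680/Spider | ZhihuSpider.py | url_transform
-- ===== SOURCE A (Python) =====
-- def url_transform(url):
--     if 'answer' in url or 'ANSWER' in url or 'Answer' in url:
--         i,j = 0,0
--         for url1 in url:
--             if url1 == 'a' or url1 =='n' or url1 =='s' or url1 =='w' or url1 =='e' or url1 =='r' or url1 =='A' or url1 =='N' or url1 =='S' or url1 == 'W' or url1=='E' or url1=='R' :
--                 i += 1
--             else:
--                 if i >=5:
--                     return url[0:j-1]
--                 if i == 0:
--                     j += 1
--                 else:
--                     j += i + 1
--                 i = 0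
--     return url
-- ===== SOURCE B (Python) =====
-- def url_transform(url):
--     if 'answer' in url or 'ANSWER' in url or 'Answer' in url:
--         S = set('answerANSWER')
--         n = len(url)
--         for k in range(n - 4):
--             if all(url[m] in S for m in range(k, k + 5)):
--                 # k is the start of the first maximal run of >= 5 special chars
--                 e = k + 5
--                 while e < n and url[e] in S:
--                     e += 1
--                 if e < n:
--                     return url[:k - 1]
--                 return url
--     return url
-- ===== Notes on version B (the rewrite author's own statement) =====
-- stated objective: alternative
-- what changed: A's single-pass state machine with counters i (current run length) and j (run start) is replaced by a direct search for the first index whose 5-character window is all special characters, followed by one scan to the run's end to decide between url[:k-1] and url.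
import Mathlib
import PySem

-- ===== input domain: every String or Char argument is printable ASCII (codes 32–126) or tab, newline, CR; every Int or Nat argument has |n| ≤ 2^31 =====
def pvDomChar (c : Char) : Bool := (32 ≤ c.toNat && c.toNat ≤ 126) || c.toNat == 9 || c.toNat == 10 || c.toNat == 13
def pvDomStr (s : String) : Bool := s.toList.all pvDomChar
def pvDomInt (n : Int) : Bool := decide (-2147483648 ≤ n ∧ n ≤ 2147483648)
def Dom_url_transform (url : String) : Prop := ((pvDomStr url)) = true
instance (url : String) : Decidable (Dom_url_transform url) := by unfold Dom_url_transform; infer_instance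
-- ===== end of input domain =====

-- B replaces A's char-by-char run-counting state machine (counters i, j) by a direct search for the
-- first 5-window of special characters, then decides from that run's end; same return value everywhere.

-- ===== PORT A =====
-- A's for-loop over the characters with state (i, j); `some j` where Python returns url[0:j-1].
def urlLoopA : List Char → Int → Int → Option Int
  | [], _, _ => none
  | c :: rest, i, j =>
    if c == 'a' || c == 'n' || c == 's' || c == 'w' || c == 'e' || c == 'r' ||
       c == 'A' || c == 'N' || c == 'S' || c == 'W' || c == 'E' || c == 'R' then
      urlLoopA rest (i + 1) j
    else
      if i ≥ 5 then some j
      else urlLoopA rest 0 (if i == 0 then j + 1 else j + i + 1)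

def url_transform (url : String) : String :=
  if PySem.Str.isIn "answer" url || PySem.Str.isIn "ANSWER" url || PySem.Str.isIn "Answer" url then
    match urlLoopA url.toList 0 0 with
    | some j => PySem.Str.slice url (some 0) (some (j - 1))   -- url[0:j-1]
    | none => url
  else url

-- ===== PORT B =====
-- B's set S = set('answerANSWER') and its membership test.
def urlSpecSet : PySem.Set Char := PySem.Set.ofList "answerANSWER".toList

def urlSpec (c : Char) : Bool := PySem.Set.contains urlSpecSet c

-- B's `for k in range(n-4)` search: first k whose 5-window is all special; then scan the run's end.
def urlLoopB (l : List Char) (k : Int) : Option Int :=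
  if l.length < 5 then none
  else if (l.take 5).all urlSpec then
    if ((l.drop 5).dropWhile urlSpec).isEmpty then none else some k
  else urlLoopB l.tail (k + 1)
termination_by l.length
decreasing_by simp_all; omega

def url_transform_alt (url : String) : String :=
  if PySem.Str.isIn "answer" url || PySem.Str.isIn "ANSWER" url || PySem.Str.isIn "Answer" url then
    match urlLoopB url.toList 0 with
    | some k => PySem.Str.slice url none (some (k - 1))   -- url[:k-1]
    | none => url
  else url

-- ===== PRECONDITION & SPEC =====
def Spec_url_transform (url : String) (out : String) : Prop := out = url_transform_alt url
instance (url : String) (out : String) : Decidable (Spec_url_transform url out) := by unfold Spec_url_transform; infer_instance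

-- ===== CLAIM (what is proved, stated in full; the proofs are below) =====
def Claim_equal_url_transform : Prop := ∀ (url : String), Dom_url_transform url → Spec_url_transform url (url_transform url)

-- ===== LEMMAS AND PROOFS =====

-- A's inline 12-fold comparison is membership in B's set.
theorem urlSpec_eq (c : Char) :
    (c == 'a' || c == 'n' || c == 's' || c == 'w' || c == 'e' || c == 'r' ||
     c == 'A' || c == 'N' || c == 'S' || c == 'W' || c == 'E' || c == 'R') = urlSpec c := by
  have h : urlSpecSet = "answerANSWER".toList := by decide
  simp only [urlSpec, h, PySem.Set.contains, Bool.beq_eq_decide_eq]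
  simp [Bool.or_assoc]

-- A consumes a run of special characters by incrementing i.
theorem urlLoopA_run (run rest : List Char) (i j : Int) (h : run.all urlSpec) :
    urlLoopA (run ++ rest) i j = urlLoopA rest (i + run.length) j := by
  induction run generalizing i with
  | nil => simp
  | cons c run' ih =>
      simp only [List.all_cons, Bool.and_eq_true] at h
      simp only [List.cons_append, urlLoopA, urlSpec_eq, h.1, if_true]
      rw [ih _ h.2]
      congr 1
      push_cast [List.length_cons]; ring

theorem urlLoopB_short (l : List Char) (k : Int) (h : l.length < 5) : urlLoopB l k = none := by
  rw [urlLoopB]; simp [h]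

-- B steps over a short special run and the non-special character ending it.
theorem urlLoopB_step : ∀ (run : List Char) (c : Char) (rest : List Char) (k : Int),
    run.all urlSpec → run.length < 5 → urlSpec c = false →
    urlLoopB (run ++ c :: rest) k = urlLoopB rest (k + run.length + 1) := by
  intro run
  induction run with
  | nil =>
      intro c rest k _ _ hc
      rw [urlLoopB]
      by_cases hlen : (([] : List Char) ++ c :: rest).length < 5
      · simp only [hlen, if_true]
        rw [urlLoopB_short rest _ (by simp at hlen ⊢; omega)]
      · simp only [hlen, if_false]
        have hwin : ((([] : List Char) ++ c :: rest).take 5).all urlSpec = false :=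
          List.all_eq_false.mpr ⟨c, by simp, by simp [hc]⟩
        simp only [hwin, Bool.false_eq_true, if_false]
        simp
  | cons d run' ih =>
      intro c rest k hall hlt hc
      simp only [List.all_cons, Bool.and_eq_true] at hall
      rw [urlLoopB]
      by_cases hlen : ((d :: run') ++ c :: rest).length < 5
      · simp only [hlen, if_true]
        rw [urlLoopB_short rest _ (by simp at hlen ⊢; omega)]
      · simp only [hlen, if_false]
        have hcmem : c ∈ (((d :: run') ++ c :: rest).take 5) := by
          rw [List.take_append]
          refine List.mem_append_right _ ?_
          have h5 : 5 - (d :: run').length ≥ 1 := by simp at hlt ⊢; omega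
          cases h : 5 - (d :: run').length with
          | zero => omega
          | succ m => simp
        have hwin : (((d :: run') ++ c :: rest).take 5).all urlSpec = false :=
          List.all_eq_false.mpr ⟨c, hcmem, by simp [hc]⟩
        simp only [hwin, Bool.false_eq_true, if_false]
        have hrec := ih c rest (k + 1) hall.2 (by simp at hlt ⊢; omega) hc
        simp only [List.cons_append, List.tail_cons] at hrec ⊢
        rw [hrec]
        congr 1
        push_cast [List.length_cons]; ring

theorem urlLoop_eq_aux (n : Nat) : ∀ (l : List Char), l.length ≤ n → ∀ (j : Int),
    urlLoopA l 0 j = urlLoopB l j := by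
  induction n with
  | zero =>
      intro l hl j
      have h : l = [] := List.eq_nil_of_length_eq_zero (by omega)
      subst h
      rw [urlLoopB_short _ _ (by simp)]; rfl
  | succ n ih =>
      intro l hl j
      -- decompose l into its leading special run and the rest
      obtain hsplit := List.takeWhile_append_dropWhile (p := urlSpec) (l := l)
      set run := l.takeWhile urlSpec with hrun
      set rest := l.dropWhile urlSpec with hrest
      have hallrun : run.all urlSpec := by
        simp only [List.all_eq_true]; intro x hx
        exact List.mem_takeWhile_imp hx
      have hA : urlLoopA l 0 j = urlLoopA rest (0 + run.length) j := by
        rw [← hsplit]; exact urlLoopA_run run rest 0 j hallrun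
      have hrested : rest.dropWhile urlSpec = rest := List.dropWhile_idempotent urlSpec l
      by_cases hbig : 5 ≤ run.length
      · -- first maximal run has length ≥ 5: both sides decide from `rest`
        have hB : urlLoopB l j = if rest.isEmpty then none else some j := by
          rw [urlLoopB]
          have hlen : ¬ l.length < 5 := by
            rw [← hsplit]; simp; omega
          simp only [hlen, if_false]
          have htake : l.take 5 = run.take 5 := by
            rw [← hsplit, List.take_append]
            have h0 : 5 - run.length = 0 := by omega
            simp [h0]
          have hwin : (l.take 5).all urlSpec = true := by
            rw [htake]; simp only [List.all_eq_true]
            intro x hx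
            exact (List.all_eq_true.mp hallrun) x (List.mem_of_mem_take hx)
          simp only [hwin, if_true]
          have hdrop : (l.drop 5).dropWhile urlSpec = rest := by
            rw [← hsplit, List.drop_append]
            have h0 : 5 - run.length = 0 := by omega
            rw [h0, List.drop_zero, List.dropWhile_append]
            have : (run.drop 5).dropWhile urlSpec = [] := by
              rw [List.dropWhile_eq_nil_iff]
              intro x hx
              exact (List.all_eq_true.mp hallrun) x (List.mem_of_mem_drop hx)
            simp [this, hrested]
          rw [hdrop]
        rw [hA, hB]
        cases hr : rest with
        | nil => simp [urlLoopA]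
        | cons c rest' =>
            have hc : urlSpec c = false := by
              have := List.head?_dropWhile_not urlSpec l
              rw [← hrest, hr] at this; simpa using this
            rw [urlLoopA, urlSpec_eq]
            simp only [hc, Bool.false_eq_true, if_false]
            have h5 : (0 : Int) + run.length ≥ 5 := by omega
            rw [if_pos h5]
            simp
      · -- leading run shorter than 5
        rw [not_le] at hbig
        cases hr : rest with
        | nil =>
            have hlen : l.length < 5 := by rw [← hsplit, hr]; simp; omega
            rw [urlLoopB_short _ _ hlen, hA, hr]
            rfl
        | cons c rest' =>
            have hc : urlSpec c = false := by
              have := List.head?_dropWhile_not urlSpec l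
              rw [← hrest, hr] at this; simpa using this
            have hstepB : urlLoopB l j = urlLoopB rest' (j + run.length + 1) := by
              rw [← hsplit, hr]
              exact urlLoopB_step run c rest' j hallrun hbig hc
            have hstepA : urlLoopA l 0 j = urlLoopA rest' 0 (j + run.length + 1) := by
              rw [hA, hr, urlLoopA, urlSpec_eq]
              simp only [hc, Bool.false_eq_true, if_false]
              have hni : ¬ ((0 : Int) + run.length ≥ 5) := by omega
              simp only [hni, if_false]
              congr 1
              by_cases h0 : run.length = 0
              · simp [h0]
              · have hne : ((0 : Int) + run.length == 0) = false := by
                  simp only [beq_eq_false_iff_ne, ne_eq]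
                  omega
                simp only [hne, Bool.false_eq_true, if_false]
                ring
            have hlenrest : rest'.length ≤ n := by
              have hlsum : l.length = run.length + (rest'.length + 1) := by
                rw [← hsplit, hr]; simp
              omega
            rw [hstepA, hstepB]
            exact ih rest' hlenrest (j + run.length + 1)

theorem urlLoop_eq (l : List Char) (j : Int) : urlLoopA l 0 j = urlLoopB l j :=
  urlLoop_eq_aux l.length l (le_refl _) j

-- ===== VERDICT (by name: the statement is the Claim_ definition above) =====
theorem url_transform_spec : Claim_equal_url_transform := by
  intro url _
  unfold Spec_url_transform url_transform url_transform_alt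
  refine if_congr Iff.rfl ?_ rfl
  rw [urlLoop_eq]
  cases urlLoopB url.toList 0 with
  | none => rfl
  | some k => simp [PySem.Str.slice, PySem.List.slice_zero_start]
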